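-- pv_equiv track=rewrite | github.com/lovehhf/newcoder_py | 笔试题/2018PayPal实习生招聘在线笔试-国外场/2_屠龙者.py | dfs
-- ===== SOURCE A (Python) =====
-- def dfs(num, par, graph, ans):
--     cnt = 1
--     for i in graph[num]:
--         if i != par:
--             nodeNum = dfs(i, num, graph, ans)
--             cnt += nodeNum
--             ans[num] = max(ans[num], nodeNum)
--     ans[num] = max(ans[num], len(ans) - cnt)
--     return cnt
-- ===== SOURCE B (Python) =====
-- def dfs(num, par, graph, ans):
--     # phase 1: iterative pre-order trace of the traversal via an explicit stack
--     stack = [(num, par)]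
--     order = []
--     while stack:
--         n, p = stack.pop()
--         cs = [c for c in graph[n] if c != p]
--         order.append((n, cs))
--         for c in cs:
--             stack.append((c, n))
--     # phase 2: scan the trace backwards (post-order), sizes kept on a stack
--     total = len(ans)
--     sizes = []
--     for n, cs in reversed(order):
--         cnt = 1
--         m = ans[n]
--         for _ in cs:
--             s = sizes.pop()
--             cnt += s
--             m = max(m, s)
--         ans[n] = max(m, total - cnt)
--         sizes.append(cnt)
--     return sizes[-1]
-- ===== Notes on version B (the rewrite author's own statement) =====
-- stated objective: alternative
-- what changed: A's recursive tree DFS is replaced by two iterative passes: an explicit-stack loop that records a pre-order trace of (node, non-parent children), then a reverse scan of that trace that computes subtree sizes on a stack and applies the ans updates.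
import Mathlib
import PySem

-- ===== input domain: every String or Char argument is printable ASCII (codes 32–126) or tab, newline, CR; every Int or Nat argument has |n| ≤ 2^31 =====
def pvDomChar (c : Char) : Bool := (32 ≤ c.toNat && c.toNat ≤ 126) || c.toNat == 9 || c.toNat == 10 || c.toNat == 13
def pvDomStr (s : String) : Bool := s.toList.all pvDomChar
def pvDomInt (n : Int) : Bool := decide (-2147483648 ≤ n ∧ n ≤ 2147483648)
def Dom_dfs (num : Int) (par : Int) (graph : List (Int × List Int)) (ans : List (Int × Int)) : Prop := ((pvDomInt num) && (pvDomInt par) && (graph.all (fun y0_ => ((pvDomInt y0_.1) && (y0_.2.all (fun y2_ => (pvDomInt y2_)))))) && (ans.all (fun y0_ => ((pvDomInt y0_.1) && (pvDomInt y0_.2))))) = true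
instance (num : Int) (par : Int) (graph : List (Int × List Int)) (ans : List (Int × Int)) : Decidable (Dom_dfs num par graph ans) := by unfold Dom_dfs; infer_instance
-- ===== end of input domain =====

-- B replaces A's recursion by two iterative passes (explicit-stack pre-order trace, then a reverse
-- scan computing sizes on a stack); equivalence is claimed for the RETURN VALUE only — both A and B
-- mutate `ans` in place (B writes the same final contents, shown by testing, not proved here).

-- dict lookup (first match) and in-place overwrite-or-append update, shared by both ports
def dget? {α : Type} : List (Int × α) → Int → Option α
  | [], _ => none
  | (k, v) :: d, x => if k = x then some v else dget? d x

def dinsert {α : Type} : List (Int × α) → Int → α → List (Int × α)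
  | [], k, v => [(k, v)]
  | (k', v') :: d, k, v => if k' = k then (k, v) :: d else (k', v') :: dinsert d k v

-- fuel bound on the recursion depth of any returning run of A: distinct (node, parent) states
def F0 (g : List (Int × List Int)) : Nat := (g.length + 1) * (g.length + 1) + 1

-- ===== PORT A =====
mutual
-- dfs body; fuel bounds recursion depth, `none` = KeyError / fuel exhausted (A raises there)
def dfsA : Nat → Int → Int → List (Int × List Int) → List (Int × Int) → Option (Int × List (Int × Int))
  | 0, _, _, _, _ => none
  | f + 1, num, par, g, ans =>
    match dget? g num with
    | none => none
    | some ch =>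
      match loopA f num par g ch 1 ans with
      | none => none
      | some (cnt, ans1) =>
        match dget? ans1 num with
        | none => none
        | some v => some (cnt, dinsert ans1 num (max v ((ans1.length : Int) - cnt)))
  termination_by f _ _ _ _ => (f, 0)

-- the `for i in graph[num]` loop, threading (cnt, ans)
def loopA : Nat → Int → Int → List (Int × List Int) → List Int → Int → List (Int × Int) → Option (Int × List (Int × Int))
  | _, _, _, _, [], cnt, ans => some (cnt, ans)
  | f, num, par, g, i :: rest, cnt, ans =>
    if i = par then loopA f num par g rest cnt ans
    else
      match dfsA f i num g ans with
      | none => none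
      | some (nn, ans1) =>
        match dget? ans1 num with
        | none => none
        | some v => loopA f num par g rest (cnt + nn) (dinsert ans1 num (max v nn))
  termination_by f _ _ _ children _ _ => (f, children.length + 1)
end

def dfs (num : Int) (par : Int) (graph : List (Int × List Int)) (ans : List (Int × Int)) : Int :=
  match dfsA (F0 graph) num par graph ans with
  | some (c, _) => c
  | none => 0

-- ===== PORT B =====
-- phase 1: explicit-stack pre-order trace; each visit records (node, children ≠ parent)
def run1 : Nat → List (Int × List Int) → List (Int × Int) → List (Int × List Int) → Option (List (Int × List Int))
  | 0, _, _, _ => none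
  | _ + 1, _, [], order => some order
  | f + 1, g, (n, p) :: st, order =>
    match dget? g n with
    | none => none
    | some ch =>
      let cs := ch.filter (fun c => c != p)
      run1 f g ((cs.map (fun c => (c, n))).reverse ++ st) (order ++ [(n, cs)])

-- the inner `for _ in cs: s = sizes.pop(); …` loop (none = pop from empty list)
def popLoop : List Int → List Int → Int → Int → Option (Int × Int × List Int)
  | [], sizes, cnt, m => some (cnt, m, sizes)
  | _ :: cs, s :: sizes, cnt, m => popLoop cs sizes (cnt + s) (max m s)
  | _ :: _, [], _, _ => none

-- phase 2: reverse scan over the trace, sizes kept on a stack, ans updated in place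
def run2 : Int → List (Int × List Int) → List Int → List (Int × Int) → Option (List Int × List (Int × Int))
  | _, [], sizes, ans => some (sizes, ans)
  | total, (n, cs) :: rest, sizes, ans =>
    match dget? ans n with
    | none => none
    | some m0 =>
      match popLoop cs sizes 1 m0 with
      | none => none
      | some (cnt, m, sizes') => run2 total rest (cnt :: sizes') (dinsert ans n (max m (total - cnt)))

-- total number of adjacency entries; (Stot+2)^F0 bounds the number of visits of any returning run
def Stot (g : List (Int × List Int)) : Nat := (g.map (fun kv => kv.2.length)).sum
def FB (g : List (Int × List Int)) : Nat := (Stot g + 2) ^ F0 g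

def dfs_alt (num : Int) (par : Int) (graph : List (Int × List Int)) (ans : List (Int × Int)) : Int :=
  match run1 (FB graph) graph [(num, par)] [] with
  | none => 0
  | some order =>
    match run2 (ans.length : Int) order.reverse [] ans with
    | none => 0
    | some (sizes, _) =>
      match sizes with
      | s :: _ => s
      | [] => 0

-- ===== PRECONDITION & SPEC =====
-- Pre_ holds exactly when Python A returns: every visited node is a key of graph and of ans and the
-- traversal terminates (A otherwise raises KeyError or RecursionError); termination of a recursion
-- over an arbitrary graph has no static closed form, so it is stated as the traversal staying within
-- depth (|graph|+1)², which any returning run does (distinct (node,parent) states bound the depth).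
def okT : Nat → Int → Int → List (Int × List Int) → List (Int × Int) → Bool
  | 0, _, _, _, _ => false
  | f + 1, num, par, g, ans =>
    match dget? g num with
    | none => false
    | some ch => (dget? ans num).isSome && ch.all (fun i => i == par || okT f i num g ans)

def Pre_dfs (num : Int) (par : Int) (graph : List (Int × List Int)) (ans : List (Int × Int)) : Prop :=
  okT (F0 graph) num par graph ans = true

instance (num : Int) (par : Int) (graph : List (Int × List Int)) (ans : List (Int × Int)) : Decidable (Pre_dfs num par graph ans) := by unfold Pre_dfs; infer_instance

def pvWitness_dfs : Int × Int × (List (Int × List Int)) × (List (Int × Int)) :=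
  (0, -1, [(0, [1, 2]), (1, [0]), (2, [0])], [(0, 0), (1, 0), (2, 0)])

def Spec_dfs (num : Int) (par : Int) (graph : List (Int × List Int)) (ans : List (Int × Int)) (out : Int) : Prop := out = dfs_alt num par graph ans
instance (num : Int) (par : Int) (graph : List (Int × List Int)) (ans : List (Int × Int)) (out : Int) : Decidable (Spec_dfs num par graph ans out) := by unfold Spec_dfs; infer_instance

-- ===== CLAIM (what is proved, stated in full; the proofs are below) =====
def Claim_equal_dfs : Prop := ∀ (num : Int) (par : Int) (graph : List (Int × List Int)) (ans : List (Int × Int)), Dom_dfs num par graph ans → Pre_dfs num par graph ans → Spec_dfs num par graph ans (dfs num par graph ans)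

-- ===== LEMMAS AND PROOFS =====

-- same key set (duplicates and values may differ); all that phase 2 reads from ans
def keysLike (d e : List (Int × Int)) : Prop := ∀ k, (dget? d k).isSome = (dget? e k).isSome

theorem keysLike_refl (d : List (Int × Int)) : keysLike d d := fun _ => rfl
theorem keysLike_symm {d e : List (Int × Int)} (h : keysLike d e) : keysLike e d := fun k => (h k).symm
theorem keysLike_trans {d e f : List (Int × Int)} (h1 : keysLike d e) (h2 : keysLike e f) : keysLike d f := fun k => (h1 k).trans (h2 k)

theorem dget?_dinsert {α : Type} (d : List (Int × α)) (k : Int) (v : α) (x : Int) :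
    dget? (dinsert d k v) x = if x = k then some v else dget? d x := by
  induction d with
  | nil =>
    simp only [dinsert, dget?]
    by_cases hx : k = x
    · rw [if_pos hx, if_pos hx.symm]
    · rw [if_neg hx, if_neg (fun h => hx h.symm)]
  | cons hd tl ih =>
    obtain ⟨k', v'⟩ := hd
    by_cases hk : k' = k
    · subst hk
      simp only [dinsert]
      simp only [if_true]
      simp only [dget?]
      by_cases hx : k' = x
      · rw [if_pos hx, if_pos hx.symm]
      · rw [if_neg hx, if_neg (fun h => hx h.symm), if_neg hx]
    · simp only [dinsert]
      rw [if_neg hk]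
      simp only [dget?, ih]
      by_cases h1 : k' = x
      · have hxk : ¬ x = k := fun h => hk (h1.trans h)
        rw [if_pos h1, if_neg hxk, if_pos h1]
      · rw [if_neg h1]
        by_cases h2 : x = k
        · rw [if_pos h2, if_pos h2]
        · rw [if_neg h2, if_neg h2, if_neg h1]

theorem keysLike_dinsert {d e : List (Int × Int)} (h : keysLike d e) (k : Int) (v : Int)
    (hk : (dget? e k).isSome = true) : keysLike (dinsert d k v) e := by
  intro x
  rw [dget?_dinsert]
  by_cases hx : x = k
  · subst hx; simp [hk]
  · simp [hx, h x]

theorem dget?_length_le (g : List (Int × List Int)) (n : Int) (ch : List Int)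
    (h : dget? g n = some ch) : ch.length ≤ Stot g := by
  induction g with
  | nil => simp [dget?] at h
  | cons hd tl ih =>
    obtain ⟨k, vs⟩ := hd
    by_cases hk : k = n
    · simp [dget?, hk] at h
      simp [Stot, ← h]
    · simp [dget?, hk] at h
      have := ih h
      simp [Stot] at this ⊢
      omega

theorem run1_empty (g : List (Int × List Int)) (order : List (Int × List Int)) (f : Nat)
    (h : 1 ≤ f) : run1 f g [] order = some order := by
  cases f with
  | zero => omega
  | succ f => rfl

theorem popLoop_spec (cs pushed sizes : List Int) (cnt m : Int)
    (h : pushed.length = cs.length) :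
    popLoop cs (pushed ++ sizes) cnt m = some (cnt + pushed.sum, pushed.foldl max m, sizes) := by
  induction pushed generalizing cs cnt m with
  | nil =>
    cases cs with
    | nil => simp [popLoop]
    | cons c cs => simp at h
  | cons s pushed ih =>
    cases cs with
    | nil => simp at h
    | cons c cs =>
      simp at h
      simp only [List.cons_append, popLoop, ih cs (cnt + s) (max m s) h, List.sum_cons, List.foldl_cons]
      congr 2
      omega

-- the simulation invariant carried through the mutual induction
mutual
theorem simA (f : Nat) (num par : Int) (g : List (Int × List Int)) (ans : List (Int × Int))
    (c : Int) (ansT : List (Int × Int)) (h : dfsA f num par g ans = some (c, ansT)) :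
    ∃ t : List (Int × List Int),
      keysLike ansT ans ∧
      t.length < (Stot g + 2) ^ f ∧
      (∀ st order fb, run1 (t.length + fb) g ((num, par) :: st) order = run1 fb g st (order ++ t)) ∧
      (∀ total rest sizes d, keysLike d ans →
        ∃ d', keysLike d' ans ∧
          run2 total (t.reverse ++ rest) sizes d = run2 total rest (c :: sizes) d') := by
  cases f with
  | zero => simp [dfsA] at h
  | succ f =>
    simp only [dfsA] at h
    cases hg : dget? g num with
    | none => rw [hg] at h; simp at h
    | some ch =>
      rw [hg] at h
      simp only [] at h
      cases hl : loopA f num par g ch 1 ans with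
      | none => rw [hl] at h; simp at h
      | some p =>
        obtain ⟨cnt, ans1⟩ := p
        rw [hl] at h
        simp only [] at h
        cases ha : dget? ans1 num with
        | none => rw [ha] at h; simp at h
        | some v =>
          rw [ha] at h
          simp only [Option.some.injEq, Prod.mk.injEq] at h
          obtain ⟨hc, hT⟩ := h
          subst hc
          obtain ⟨tcat, pushed, hk1, hlen, hrun, hplen, hpsum, hrun2⟩ := simL f num par g ch 1 ans cnt ans1 hl
          have hnum : (dget? ans num).isSome = true := by rw [← hk1 num, ha]; rfl
          refine ⟨(num, ch.filter (fun c => c != par)) :: tcat, ?_, ?_, ?_, ?_⟩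
          · rw [← hT]
            exact keysLike_dinsert hk1 num _ hnum
          · have hch := dget?_length_le g num ch hg
            have hX : 0 < (Stot g + 2) ^ f := pow_pos (by omega) f
            have he : (Stot g + 2) ^ (f + 1) = Stot g * (Stot g + 2) ^ f + 2 * (Stot g + 2) ^ f := by
              rw [pow_succ]; ring
            have hm : ch.length * (Stot g + 2) ^ f ≤ Stot g * (Stot g + 2) ^ f :=
              Nat.mul_le_mul_right _ hch
            rw [List.length_cons]
            omega
          · intro st order fb
            have e1 : ((num, ch.filter (fun c => c != par)) :: tcat).length + fb = (tcat.length + fb) + 1 := by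
              rw [List.length_cons]; omega
            rw [e1]
            simp only [run1, hg]
            rw [hrun st (order ++ [(num, ch.filter (fun c => c != par))]) fb]
            rw [List.append_assoc]
            rfl
          · intro total rest sizes d hd
            obtain ⟨d', hd', heq⟩ := hrun2 total ((num, ch.filter (fun c => c != par)) :: rest) sizes d hd
            have hnum' : (dget? d' num).isSome = true := by rw [hd' num]; exact hnum
            obtain ⟨m0, hm0⟩ : ∃ m0, dget? d' num = some m0 := ⟨_, (Option.some_get hnum').symm⟩
            refine ⟨dinsert d' num (max (pushed.foldl max m0) (total - cnt)), keysLike_dinsert hd' num _ hnum, ?_⟩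
            rw [List.reverse_cons, List.append_assoc, List.cons_append, List.nil_append, heq]
            simp only [run2]
            rw [hm0]
            simp only []
            rw [popLoop_spec _ pushed sizes 1 _ hplen]
            simp only []
            rw [hpsum]
  termination_by (f, 0)

theorem simL (f : Nat) (num par : Int) (g : List (Int × List Int)) (children : List Int)
    (cnt : Int) (ans : List (Int × Int)) (cntT : Int) (ansT : List (Int × Int))
    (h : loopA f num par g children cnt ans = some (cntT, ansT)) :
    ∃ (t : List (Int × List Int)) (pushed : List Int),
      keysLike ansT ans ∧
      t.length ≤ children.length * (Stot g + 2) ^ f ∧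
      (∀ st order fb,
        run1 (t.length + fb) g (((children.filter (fun c => c != par)).map (fun c => (c, num))).reverse ++ st) order
          = run1 fb g st (order ++ t)) ∧
      pushed.length = (children.filter (fun c => c != par)).length ∧
      cnt + pushed.sum = cntT ∧
      (∀ total rest sizes d, keysLike d ans →
        ∃ d', keysLike d' ans ∧
          run2 total (t.reverse ++ rest) sizes d = run2 total rest (pushed ++ sizes) d') := by
  cases children with
  | nil =>
    simp only [loopA, Option.some.injEq, Prod.mk.injEq] at h
    obtain ⟨hc, hT⟩ := h
    refine ⟨[], [], by rw [← hT]; exact fun k => rfl, by simp, ?_, by simp, by simp [hc], ?_⟩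
    · intro st order fb
      simp
    · intro total rest sizes d hd
      exact ⟨d, hd, by simp⟩
  | cons i rest =>
    simp only [loopA] at h
    by_cases hip : i = par
    · rw [if_pos hip] at h
      obtain ⟨t, pushed, hk, hlen, hrun, hplen, hpsum, hrun2⟩ := simL f num par g rest cnt ans cntT ansT h
      have hfil : (i :: rest).filter (fun c => c != par) = rest.filter (fun c => c != par) := by
        have hb : (i != par) = false := by simp [hip]
        simp [List.filter, hb]
      refine ⟨t, pushed, hk, ?_, by rw [hfil]; exact hrun, by rw [hfil]; exact hplen, hpsum, hrun2⟩
      have hX : 0 < (Stot g + 2) ^ f := pow_pos (by omega) f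
      have he : ((i :: rest).length) * (Stot g + 2) ^ f = rest.length * (Stot g + 2) ^ f + (Stot g + 2) ^ f := by
        rw [List.length_cons]; ring
      omega
    · rw [if_neg hip] at h
      cases hdfs : dfsA f i num g ans with
      | none => rw [hdfs] at h; simp at h
      | some p =>
        obtain ⟨nn, ans1⟩ := p
        rw [hdfs] at h
        simp only [] at h
        cases ha : dget? ans1 num with
        | none => rw [ha] at h; simp at h
        | some v =>
          rw [ha] at h
          obtain ⟨ti, hki, hleni, hruni, hrun2i⟩ := simA f i num g ans nn ans1 hdfs
          have hnum : (dget? ans num).isSome = true := by rw [← hki num, ha]; rfl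
          have hk2 : keysLike (dinsert ans1 num (max v nn)) ans := keysLike_dinsert hki num _ hnum
          obtain ⟨tr, pr, hkr, hlenr, hrunr, hplenr, hpsumr, hrun2r⟩ :=
            simL f num par g rest (cnt + nn) (dinsert ans1 num (max v nn)) cntT ansT h
          have hfil : (i :: rest).filter (fun c => c != par) = i :: rest.filter (fun c => c != par) := by
            have hb : (i != par) = true := by simp [hip]
            simp [List.filter, hb]
          refine ⟨tr ++ ti, pr ++ [nn], keysLike_trans hkr hk2, ?_, ?_, ?_, ?_, ?_⟩
          · have hX : 0 < (Stot g + 2) ^ f := pow_pos (by omega) f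
            have he : ((i :: rest).length) * (Stot g + 2) ^ f = rest.length * (Stot g + 2) ^ f + (Stot g + 2) ^ f := by
              rw [List.length_cons]; ring
            rw [List.length_append]
            omega
          · intro st order fb
            rw [hfil]
            simp only [List.map_cons, List.reverse_cons, List.append_assoc, List.cons_append, List.nil_append]
            have e1 : (tr ++ ti).length + fb = tr.length + (ti.length + fb) := by
              rw [List.length_append]; omega
            rw [e1, hrunr ((i, num) :: st) order (ti.length + fb), hruni st (order ++ tr) fb, List.append_assoc]
          · rw [hfil, List.length_append, List.length_cons]
            simp [hplenr]
          · rw [List.sum_append, List.sum_cons, List.sum_nil]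
            omega
          · intro total rest0 sizes d hd
            obtain ⟨d1, hd1, e1⟩ := hrun2i total (tr.reverse ++ rest0) sizes d hd
            obtain ⟨d2, hd2, e2⟩ := hrun2r total rest0 (nn :: sizes) d1 (keysLike_trans hd1 (keysLike_symm hk2))
            refine ⟨d2, keysLike_trans hd2 hk2, ?_⟩
            rw [List.reverse_append, List.append_assoc, e1, e2, List.append_assoc]
            rfl
  termination_by (f, children.length + 1)
end

mutual
theorem okT_sound (f : Nat) (num par : Int) (g : List (Int × List Int)) (ans : List (Int × Int))
    (h : okT f num par g ans = true) (d : List (Int × Int)) (hd : keysLike d ans) :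
    ∃ c dT, dfsA f num par g d = some (c, dT) ∧ keysLike dT ans := by
  cases f with
  | zero => simp [okT] at h
  | succ f =>
    simp only [okT] at h
    cases hg : dget? g num with
    | none => rw [hg] at h; simp at h
    | some ch =>
      rw [hg] at h
      simp only [Bool.and_eq_true] at h
      obtain ⟨h1, h2⟩ := h
      obtain ⟨cT, dT, hloop, hk⟩ := okTL_sound f num par g ch ans h2 h1 1 d hd
      have hv : (dget? dT num).isSome = true := by rw [hk num]; exact h1
      obtain ⟨v, hv'⟩ := Option.isSome_iff_exists.mp hv
      refine ⟨cT, dinsert dT num (max v ((dT.length : Int) - cT)), ?_, keysLike_dinsert hk num _ h1⟩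
      simp [dfsA, hg, hloop, hv']
  termination_by (f, 0)

theorem okTL_sound (f : Nat) (num par : Int) (g : List (Int × List Int)) (children : List Int)
    (ans : List (Int × Int)) (h : children.all (fun i => i == par || okT f i num g ans) = true)
    (hnum : (dget? ans num).isSome = true) (cnt : Int) (d : List (Int × Int)) (hd : keysLike d ans) :
    ∃ cT dT, loopA f num par g children cnt d = some (cT, dT) ∧ keysLike dT ans := by
  cases children with
  | nil => exact ⟨cnt, d, by simp [loopA], hd⟩
  | cons i rest =>
    simp only [List.all_cons, Bool.and_eq_true, Bool.or_eq_true] at h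
    obtain ⟨hi, hrest⟩ := h
    by_cases hip : i = par
    · obtain ⟨cT, dT, hl, hk⟩ := okTL_sound f num par g rest ans hrest hnum cnt d hd
      exact ⟨cT, dT, by simp [loopA, hip, hl], hk⟩
    · have hok : okT f i num g ans = true := by
        rcases hi with hi | hi
        · exact absurd (by simpa using hi) hip
        · exact hi
      obtain ⟨nn, d1, hdfs, hk1⟩ := okT_sound f i num g ans hok d hd
      have hv : (dget? d1 num).isSome = true := by rw [hk1 num]; exact hnum
      obtain ⟨cT, dT, hl, hk⟩ := okTL_sound f num par g rest ans hrest hnum (cnt + nn)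
        (dinsert d1 num (max (Option.get (dget? d1 num) hv) nn)) (keysLike_dinsert hk1 num _ hnum)
      refine ⟨cT, dT, ?_, hk⟩
      have hv' : dget? d1 num = some (Option.get (dget? d1 num) hv) := (Option.some_get hv).symm
      simp [loopA, hip, hdfs]
      rw [hv']
      exact hl
  termination_by (f, children.length + 1)
end

-- ===== VERDICT (by name: the statement is the Claim_ definition above) =====
theorem dfs_spec : Claim_equal_dfs := by
  intro num par g ans hdom hpre
  obtain ⟨c, dT, hdfs, _⟩ := okT_sound (F0 g) num par g ans hpre ans (keysLike_refl ans)
  obtain ⟨t, hkT, hlen, hrun, hrun2⟩ := simA (F0 g) num par g ans c dT hdfs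
  have hlt : t.length < FB g := hlen
  have hFB : t.length + (FB g - t.length) = FB g := by omega
  have h1 : run1 (FB g) g [(num, par)] [] = some t := by
    have h0 := hrun [] [] (FB g - t.length)
    rw [hFB] at h0
    rw [h0, run1_empty g ([] ++ t) _ (by omega), List.nil_append]
  obtain ⟨d', hd', h2⟩ := hrun2 (ans.length : Int) [] [] ans (keysLike_refl ans)
  rw [List.append_nil] at h2
  unfold Spec_dfs dfs dfs_alt
  rw [hdfs, h1]
  simp only []
  rw [h2]
  simp [run2]
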